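-- pv_equiv track=rewrite | github.com/igotyabingo/codingtest | Python3/프로그래머스/2/42626. 더 맵게/더 맵게.py | solution
-- ===== SOURCE A (Python) =====
-- from heapq import heapify, heappush, heappop
--
-- def solution(scoville, K):
--     answer = 0
--     # using minheap -> heappush, heappop
--     heapify(scoville) # 기본 = minheap
--
--     while len(scoville) > 1 and scoville[0] < K:
--         answer += 1
--         a = heappop(scoville)
--         b = heappop(scoville)
--
--         heappush(scoville, a + b*2)
--
--     if len(scoville) == 1 and scoville[0] < K:
--         return -1
--     return answer
-- ===== SOURCE B (Python) =====
-- def solution(scoville, K):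
--     # sorted list instead of a heap: pop the two smallest from the front,
--     # re-insert the mix by hand-written binary insertion (caller's list is not mutated)
--     s = sorted(scoville)
--     answer = 0
--     while len(s) > 1 and s[0] < K:
--         mixed = s[0] + s[1] * 2
--         s = s[2:]
--         lo, hi = 0, len(s)
--         while lo < hi:
--             mid = (lo + hi) // 2
--             if s[mid] < mixed:
--                 lo = mid + 1
--             else:
--                 hi = mid
--         s.insert(lo, mixed)
--         answer += 1
--     if len(s) == 1 and s[0] < K:
--         return -1
--     return answer
-- ===== Notes on version B (the rewrite author's own statement) =====
-- stated objective: alternative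
-- what changed: Replaces the binary heap (heapify/heappop/heappush) with a sorted list built once by sort and kept ordered by popping the two front elements and re-inserting the mix via a hand-written binary insertion; B also leaves the caller's list unmutated while A heapifies it in place.
import Mathlib
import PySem

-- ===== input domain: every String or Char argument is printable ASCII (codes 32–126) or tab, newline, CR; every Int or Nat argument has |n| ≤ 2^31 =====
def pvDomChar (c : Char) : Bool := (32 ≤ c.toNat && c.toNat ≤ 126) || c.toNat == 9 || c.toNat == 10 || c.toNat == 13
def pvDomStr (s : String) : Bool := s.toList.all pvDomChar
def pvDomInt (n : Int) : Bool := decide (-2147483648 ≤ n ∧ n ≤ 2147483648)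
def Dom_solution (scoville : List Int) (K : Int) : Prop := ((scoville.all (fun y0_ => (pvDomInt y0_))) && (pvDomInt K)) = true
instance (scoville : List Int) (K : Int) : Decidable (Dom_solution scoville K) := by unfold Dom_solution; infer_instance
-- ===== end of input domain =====

-- B replaces the heap with a sorted list kept ordered by hand-written binary insertion
-- (objective: alternative decomposition). Equivalence is about the RETURN value only:
-- Python A heapifies the caller's list in place, B leaves the caller's list unmutated.

-- ===== PORT A =====
-- heapq has no PySem primitive; the heap list is modeled by hand through its observable
-- contract, which is exact for every value `solution` reads: heapNorm puts the minimum at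
-- index 0 and keeps the multiset (heapify / the state after heappop / heappush), so
-- scoville[0], each heappop result and len(scoville) are exactly Python's.
def heapNorm (l : List Int) : List Int :=
  match l.min? with
  | none => []
  | some m => m :: l.erase m

theorem heapNorm_perm (l : List Int) : (heapNorm l).Perm l := by
  unfold heapNorm
  cases hm : l.min? with
  | none => simp [List.min?_eq_none_iff.mp hm]
  | some m =>
    exact (List.perm_cons_erase ((List.min?_eq_some_iff).mp hm).1).symm

theorem heapNorm_length (l : List Int) : (heapNorm l).length = l.length :=
  (heapNorm_perm l).length_eq

-- the while loop of A: answer accumulates, state is the heap list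
def heapLoop (h : List Int) (K : Int) (ans : Int) : Int :=
  if 1 < h.length ∧ h.headD 0 < K then
    let a := h.headD 0                    -- a = heappop(scoville)
    let h1 := heapNorm h.tail
    let b := h1.headD 0                   -- b = heappop(scoville)
    let h2 := heapNorm h1.tail
    heapLoop (heapNorm (h2 ++ [a + b * 2])) K (ans + 1)   -- heappush(scoville, a+b*2)
  else if h.length = 1 ∧ h.headD 0 < K then -1 else ans
termination_by h.length
decreasing_by
  rename_i hc
  simp only [heapNorm_length, List.length_append, List.length_tail, List.length_cons,
    List.length_nil]
  omega

def solution (scoville : List Int) (K : Int) : Int :=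
  heapLoop (heapNorm scoville) K 0        -- heapify(scoville)

-- ===== PORT B =====
-- the inner `while lo < hi` binary search of Source B
def bsLoop (s : List Int) (x : Int) (lo hi : Nat) : Nat :=
  if lo < hi then
    let mid := (lo + hi) / 2
    if s.getD mid 0 < x then bsLoop s x (mid + 1) hi else bsLoop s x lo mid
  else lo
termination_by hi - lo
decreasing_by all_goals omega

-- the outer while loop of Source B: state is the sorted list
def altLoop (s : List Int) (K : Int) (ans : Int) : Int :=
  if 1 < s.length ∧ s.headD 0 < K then
    let mixed := s.headD 0 + s.tail.headD 0 * 2    -- s[0] + s[1]*2 (guarded by len > 1)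
    let s2 := s.drop 2                              -- s = s[2:]
    let lo := bsLoop s2 mixed 0 s2.length
    altLoop (s2.take lo ++ mixed :: s2.drop lo) K (ans + 1)   -- s.insert(lo, mixed)
  else if s.length = 1 ∧ s.headD 0 < K then -1 else ans
termination_by s.length
decreasing_by
  rename_i hc
  simp only [List.length_append, List.length_take, List.length_cons, List.length_drop]
  omega

def solution_alt (scoville : List Int) (K : Int) : Int :=
  altLoop (PySem.List.sorted scoville (fun x => x) false) K 0

-- ===== PRECONDITION & SPEC =====
def Spec_solution (scoville : List Int) (K : Int) (out : Int) : Prop := out = solution_alt scoville K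
instance (scoville : List Int) (K : Int) (out : Int) : Decidable (Spec_solution scoville K out) := by unfold Spec_solution; infer_instance

-- ===== CLAIM (what is proved, stated in full; the proofs are below) =====
def Claim_equal_solution : Prop := ∀ (scoville : List Int) (K : Int), Dom_solution scoville K → Spec_solution scoville K (solution scoville K)

-- ===== LEMMAS AND PROOFS =====

-- the head of heapNorm is a lower bound of the list
theorem heapNorm_head_le (l : List Int) : ∀ x ∈ heapNorm l, (heapNorm l).headD 0 ≤ x := by
  intro x hx
  rcases hm : l.min? with _ | m
  · simp [heapNorm, hm] at hx
  · simp only [heapNorm, hm, List.headD_cons] at hx ⊢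
    obtain ⟨hmem, hle⟩ := (List.min?_eq_some_iff).mp hm
    rcases List.mem_cons.mp hx with rfl | hxe
    · exact le_refl x
    · exact hle x (List.mem_of_mem_erase hxe)

-- head of a (≤)-pairwise list is a lower bound
theorem pairwise_head_le (s : List Int) (hs : s.Pairwise (· ≤ ·)) :
    ∀ x ∈ s, s.headD 0 ≤ x := by
  cases s with
  | nil => intro x hx; simp at hx
  | cons a t =>
    intro x hx
    simp only [List.headD_cons]
    rcases List.mem_cons.mp hx with rfl | hxt
    · exact le_refl x
    · exact (List.pairwise_cons.mp hs).1 x hxt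

-- two permuted lists whose heads are lower bounds have the same head
theorem head_eq_of_perm_min (h s : List Int) (hp : h.Perm s) (hne : h ≠ [])
    (hh : ∀ x ∈ h, h.headD 0 ≤ x) (hss : ∀ x ∈ s, s.headD 0 ≤ x) :
    h.headD 0 = s.headD 0 := by
  have hsne : s ≠ [] := by
    intro e; exact hne (List.eq_nil_of_length_eq_zero (by rw [hp.length_eq, e]; rfl))
  have hmem : h.headD 0 ∈ h := by
    cases h with | nil => exact absurd rfl hne | cons a t => simp
  have smem : s.headD 0 ∈ s := by
    cases s with | nil => exact absurd rfl hsne | cons a t => simp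
  exact le_antisymm (hh _ (hp.mem_iff.mpr smem)) (hss _ (hp.mem_iff.mp hmem))

-- bisect_left invariant: everything below the result is < x, everything at/above it is ≥ x
theorem bsLoop_spec (s : List Int) (x : Int)
    (hmono : ∀ (i j : Nat), i < j → j < s.length → s.getD i 0 ≤ s.getD j 0) :
    ∀ d lo hi, hi - lo = d → lo ≤ hi → hi ≤ s.length →
    (∀ i, i < lo → s.getD i 0 < x) → (∀ i, hi ≤ i → i < s.length → x ≤ s.getD i 0) →
    bsLoop s x lo hi ≤ s.length ∧ (∀ i, i < bsLoop s x lo hi → s.getD i 0 < x) ∧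
      (∀ i, bsLoop s x lo hi ≤ i → i < s.length → x ≤ s.getD i 0) := by
  intro d
  induction d using Nat.strong_induction_on with
  | _ d ih =>
    intro lo hi hd hlh hhl hlow hhigh
    rw [bsLoop]
    by_cases hlt : lo < hi
    · simp only [if_pos hlt]
      set mid := (lo + hi) / 2 with hmid
      by_cases hcmp : s.getD mid 0 < x
      · simp only [if_pos hcmp]
        refine ih (hi - (mid + 1)) (by omega) (mid + 1) hi (by rfl) (by omega) hhl ?_ hhigh
        intro i hilt
        rcases Nat.lt_or_ge i mid with h1 | h1
        · exact lt_of_le_of_lt (hmono i mid h1 (by omega)) hcmp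
        · have : i = mid := by omega
          subst this; exact hcmp
      · simp only [if_neg hcmp]
        refine ih (mid - lo) (by omega) lo mid (by rfl) (by omega) (by omega) hlow ?_
        intro i hmi hil
        rcases Nat.lt_or_ge i mid with h1 | h1
        · omega
        · rcases Nat.eq_or_lt_of_le h1 with h2 | h2
          · subst h2; omega
          · exact le_trans (by omega : x ≤ s.getD mid 0) (hmono mid i h2 hil)
    · simp only [if_neg hlt]
      have : lo = hi := by omega
      subst this
      exact ⟨by omega, hlow, fun i h1 h2 => hhigh i h1 h2⟩

-- a pairwise-(≤) list is monotone under getD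
theorem pairwise_getD_mono (s : List Int) (hs : s.Pairwise (· ≤ ·)) :
    ∀ (i j : Nat), i < j → j < s.length → s.getD i 0 ≤ s.getD j 0 := by
  intro i j hij hj
  rw [List.getD_eq_getElem s 0 (by omega), List.getD_eq_getElem s 0 hj]
  exact List.pairwise_iff_getElem.mp hs i j (by omega) hj hij

theorem mem_take_lt (s : List Int) (x : Int) (lo : Nat)
    (hbelow : ∀ i, i < lo → s.getD i 0 < x) :
    ∀ a ∈ s.take lo, a < x := by
  intro a ha
  obtain ⟨i, hi, rfl⟩ := List.mem_iff_getElem.mp ha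
  have hi' : i < s.length := by
    have := List.length_take (l := s) (i := lo); omega
  rw [List.getElem_take]
  rw [← List.getD_eq_getElem s 0 hi']
  exact hbelow i (by simp [List.length_take] at hi; omega)

theorem mem_drop_ge (s : List Int) (x : Int) (lo : Nat)
    (habove : ∀ i, lo ≤ i → i < s.length → x ≤ s.getD i 0) :
    ∀ b ∈ s.drop lo, x ≤ b := by
  intro b hb
  obtain ⟨j, hj, rfl⟩ := List.mem_iff_getElem.mp hb
  have hj' : lo + j < s.length := by
    have := List.length_drop (i := lo) (l := s); omega
  rw [List.getElem_drop, ← List.getD_eq_getElem s 0 hj']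
  exact habove (lo + j) (by omega) hj'

-- the binary insertion of Source B preserves sortedness
theorem insert_bs_sorted (s : List Int) (x : Int) (hs : s.Pairwise (· ≤ ·)) :
    (s.take (bsLoop s x 0 s.length) ++ x :: s.drop (bsLoop s x 0 s.length)).Pairwise (· ≤ ·) := by
  obtain ⟨hle, hbelow, habove⟩ := bsLoop_spec s x (pairwise_getD_mono s hs) s.length 0 s.length
    rfl (by omega) (le_refl _) (by omega) (by omega)
  set lo := bsLoop s x 0 s.length with hlo
  rw [List.pairwise_append]
  refine ⟨hs.sublist (List.take_sublist _ _), ?_, ?_⟩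
  · rw [List.pairwise_cons]
    exact ⟨mem_drop_ge s x lo habove, hs.sublist (List.drop_sublist _ _)⟩
  · intro a ha b hb
    have hax : a < x := mem_take_lt s x lo hbelow a ha
    rcases List.mem_cons.mp hb with rfl | hbd
    · exact le_of_lt hax
    · exact le_trans (le_of_lt hax) (mem_drop_ge s x lo habove b hbd)

-- main coupling lemma
theorem loop_eq : ∀ (n : Nat) (h s : List Int) (K ans : Int), h.length = n → h.Perm s →
    s.Pairwise (· ≤ ·) → (∀ x ∈ h, h.headD 0 ≤ x) →
    heapLoop h K ans = altLoop s K ans := by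
  intro n
  induction n with
  | zero =>
    intro h s K ans hlen hp hsort hmin
    have hh : h = [] := List.eq_nil_of_length_eq_zero hlen
    have hss : s = [] := List.eq_nil_of_length_eq_zero (by rw [← hp.length_eq, hlen])
    subst hh; subst hss
    rw [heapLoop, altLoop]; simp
  | succ n ih =>
    intro h s K ans hlen hp hsort hmin
    have hslen : s.length = n + 1 := by rw [← hp.length_eq, hlen]
    have hne : h ≠ [] := by intro e; rw [e] at hlen; simp at hlen
    have hdeq : h.headD 0 = s.headD 0 :=
      head_eq_of_perm_min h s hp hne hmin (pairwise_head_le s hsort)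
    rw [heapLoop, altLoop]
    by_cases hc : 1 < h.length ∧ h.headD 0 < K
    · have hc' : 1 < s.length ∧ s.headD 0 < K := by
        refine ⟨by omega, by rw [← hdeq]; exact hc.2⟩
      rw [if_pos hc, if_pos hc']
      obtain ⟨a, t, rfl⟩ : ∃ a t, h = a :: t := by
        cases h with | nil => exact absurd rfl hne | cons a t => exact ⟨a, t, rfl⟩
      obtain ⟨a', u, rfl⟩ : ∃ a' u, s = a' :: u := by
        cases s with | nil => simp at hslen | cons a' u => exact ⟨a', u, rfl⟩
      have hab : a = a' := by simpa using hdeq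
      subst hab
      have htu : t.Perm u := (List.perm_cons a).mp hp
      have htlen : t.length = n := by simpa using hlen
      have hulen : u.length = n := by simpa using hslen
      have hn1 : 1 ≤ n := by simp at hc; omega
      have usort : u.Pairwise (· ≤ ·) := (List.pairwise_cons.mp hsort).2
      -- destructure u and heapNorm t
      obtain ⟨b', u', rfl⟩ : ∃ b' u', u = b' :: u' := by
        cases u with | nil => simp at hulen; omega | cons b' u' => exact ⟨b', u', rfl⟩
      have h1p : (heapNorm t).Perm t := heapNorm_perm t
      obtain ⟨b, t1, hh1⟩ : ∃ b t1, heapNorm t = b :: t1 := by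
        cases hh1 : heapNorm t with
        | nil => exfalso; have := heapNorm_length t; rw [hh1] at this; simp at this; omega
        | cons b t1 => exact ⟨b, t1, rfl⟩
      have hbb : b = b' := by
        have := head_eq_of_perm_min (heapNorm t) (b' :: u') (h1p.trans htu)
          (by rw [hh1]; simp) (heapNorm_head_le t) (pairwise_head_le _ usort)
        rw [hh1] at this; simpa using this
      subst hbb
      have ht1u' : t1.Perm u' := by
        have : (b :: t1).Perm (b :: u') := by rw [← hh1]; exact h1p.trans htu
        exact (List.perm_cons b).mp this
      -- simplify both sides' state expressions
      simp only [List.headD_cons, List.tail_cons, hh1, List.drop_succ_cons, List.drop_zero]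
      set m := a + b * 2 with hm
      set lo := bsLoop u' m 0 u'.length with hlo
      -- apply the induction hypothesis
      refine ih _ _ K (ans + 1) ?_ ?_ ?_ (heapNorm_head_le _)
      · rw [heapNorm_length, List.length_append, heapNorm_length]
        have : t1.length = n - 1 := by
          have := heapNorm_length t; rw [hh1] at this; simp at this; omega
        simp [this]; omega
      · refine (heapNorm_perm _).trans ?_
        refine (List.perm_append_singleton m _).trans ?_
        have h1 : (m :: heapNorm t1).Perm (m :: u') :=
          List.Perm.cons m ((heapNorm_perm t1).trans ht1u')
        refine h1.trans ?_
        have h2 : (u'.take lo ++ m :: u'.drop lo).Perm (m :: (u'.take lo ++ u'.drop lo)) :=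
          List.perm_middle
        rw [List.take_append_drop] at h2
        exact h2.symm
      · have usort' : u'.Pairwise (· ≤ ·) := (List.pairwise_cons.mp usort).2
        exact insert_bs_sorted u' m usort'
    · have hc' : ¬ (1 < s.length ∧ s.headD 0 < K) := by
        rw [hslen, ← hdeq]; rw [hlen] at hc; exact hc
      rw [if_neg hc, if_neg hc', hlen, hslen, hdeq]

-- ===== VERDICT (by name: the statement is the Claim_ definition above) =====
theorem solution_spec : Claim_equal_solution := by
  intro scoville K _
  unfold Spec_solution solution solution_alt
  exact loop_eq scoville.length (heapNorm scoville) _ K 0 (heapNorm_length scoville)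
    ((heapNorm_perm scoville).trans (PySem.List.sorted_perm scoville (fun x => x) false).symm)
    (PySem.List.sorted_pairwise scoville (fun x => x))
    (heapNorm_head_le scoville)
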